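-- pv_equiv track=rewrite | github.com/KID76473/LeetCode | oneline_assessment.py | countValidSubstrings
-- ===== SOURCE A (Python) =====
-- def countValidSubstrings(s, minLen, maxLen):
--     def count(last_index, cur_index):
--         result = 0
--         for i in range(minLen, min(maxLen + 1, n)):
--             result += cur_index + 1 - last_index - i + 1
--         return result
--
--     res = 0
--     n = len(s)
--     if minLen == 1:
--         res += n
--     last = 0
--     for i in range(n - 1):
--         if s[i] == s[i + 1]:
--             res += count(last, i)
--             last = i + 1
--     res += count(last, n - 1)
--     return res
-- ===== SOURCE B (Python) =====
-- def countValidSubstrings(s, minLen, maxLen):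
--     n = len(s)
--     hi = min(maxLen + 1, n)
--     m = hi - minLen
--     res = n if minLen == 1 else 0
--     if m <= 0:
--         return res
--     S = m * (minLen + hi - 1) // 2  # sum of minLen..hi-1 (exact: product is even)
--     last = 0
--     for i, (a, b) in enumerate(zip(s, s[1:])):
--         if a == b:
--             res += m * (i + 2 - last) - S
--             last = i + 1
--     return res + m * (n + 1 - last) - S
-- ===== Notes on version B (the rewrite author's own statement) =====
-- stated objective: faster
-- what changed: The inner per-boundary loop summing an arithmetic series over range(minLen, min(maxLen+1, n)) is replaced by a closed-form formula (the series sum S computed once), and the scan walks adjacent pairs via enumerate(zip(s, s[1:])) instead of indexing.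
import Mathlib
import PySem

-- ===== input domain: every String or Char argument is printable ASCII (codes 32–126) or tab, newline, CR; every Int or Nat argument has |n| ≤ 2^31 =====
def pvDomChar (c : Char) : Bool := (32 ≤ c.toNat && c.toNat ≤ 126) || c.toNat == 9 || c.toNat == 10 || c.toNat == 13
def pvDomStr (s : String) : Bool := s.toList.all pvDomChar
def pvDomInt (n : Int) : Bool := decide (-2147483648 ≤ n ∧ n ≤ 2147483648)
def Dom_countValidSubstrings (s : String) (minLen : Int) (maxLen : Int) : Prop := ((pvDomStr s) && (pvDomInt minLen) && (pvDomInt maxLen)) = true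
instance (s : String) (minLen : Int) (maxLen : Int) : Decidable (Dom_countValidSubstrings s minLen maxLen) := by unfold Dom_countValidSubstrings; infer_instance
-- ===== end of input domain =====

-- B replaces A's inner arithmetic-series loop by a closed-form sum computed once and scans
-- adjacent pairs with enumerate(zip(s, s[1:])) instead of indexing (objective: faster).

-- ===== PORT A =====
def countValidSubstrings (s : String) (minLen : Int) (maxLen : Int) : Int :=
  let cs := s.toList
  let n : Int := (cs.length : Int)
  -- inner helper 'count'
  let count : Int → Int → Int := fun last_index cur_index =>
    (PySem.List.pyRange minLen (min (maxLen + 1) n) 1).foldl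
      (fun result i => result + (cur_index + 1 - last_index - i + 1)) 0
  let res0 : Int := if minLen == 1 then n else 0
  -- s[i] and s[i+1]: every i drawn from range(n-1) is in range, so the default is never used
  let st := (PySem.List.pyRange 0 (n - 1) 1).foldl
    (fun (st : Int × Int) i =>
      if PySem.List.pyGetD cs i ' ' == PySem.List.pyGetD cs (i + 1) ' ' then
        (st.1 + count st.2 i, i + 1)
      else st)
    (res0, 0)
  st.1 + count st.2 (n - 1)

-- ===== PORT B =====
def countValidSubstrings_alt (s : String) (minLen : Int) (maxLen : Int) : Int :=
  let cs := s.toList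
  let n : Int := (cs.length : Int)
  let hi : Int := min (maxLen + 1) n
  let m : Int := hi - minLen
  let res0 : Int := if minLen == 1 then n else 0
  if m ≤ 0 then res0
  else
    -- S = sum of minLen..hi-1; the product is even, so floor division is exact
    let S : Int := PySem.Int.floordiv (m * (minLen + hi - 1)) 2
    let st := (PySem.List.enumerate (cs.zip (PySem.List.slice cs (some 1) none)) 0).foldl
      (fun (st : Int × Int) p =>
        if p.2.1 == p.2.2 then (st.1 + m * (p.1 + 2 - st.2) - S, p.1 + 1) else st)
      (res0, 0)
    st.1 + m * (n + 1 - st.2) - S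

-- ===== PRECONDITION & SPEC =====
def Spec_countValidSubstrings (s : String) (minLen : Int) (maxLen : Int) (out : Int) : Prop := out = countValidSubstrings_alt s minLen maxLen
instance (s : String) (minLen : Int) (maxLen : Int) (out : Int) : Decidable (Spec_countValidSubstrings s minLen maxLen out) := by unfold Spec_countValidSubstrings; infer_instance

-- ===== CLAIM (what is proved, stated in full; the proofs are below) =====
def Claim_equal_countValidSubstrings : Prop := ∀ (s : String) (minLen : Int) (maxLen : Int), Dom_countValidSubstrings s minLen maxLen → Spec_countValidSubstrings s minLen maxLen (countValidSubstrings s minLen maxLen)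

-- ===== LEMMAS AND PROOFS =====

-- 2·Σ_{k<n} (D − k) = n·(2D − n + 1)
lemma pv_sum_lin (n : Nat) (D : Int) :
    2 * (((List.range n).map (fun k : Nat => D - (k : Int))).sum) = (n : Int) * (2 * D - n + 1) := by
  induction n with
  | zero => simp
  | succ n ih =>
      rw [List.range_succ, List.map_append, List.sum_append]
      simp only [List.map_cons, List.map_nil, List.sum_cons, List.sum_nil]
      push_cast
      push_cast at ih
      linear_combination ih

-- A's inner loop, doubled, in closed form
lemma pv_two_mul_count (a b C : Int) :
    2 * ((PySem.List.pyRange a b 1).foldl (fun r i => r + (C - i)) 0) =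
      ((b - a).toNat : Int) * (2 * (C - a) - (b - a).toNat + 1) := by
  rw [PySem.List.foldl_add _ (fun i => C - i), PySem.List.pyRange_one, List.map_map]
  have h : ((fun i => C - i) ∘ fun k : Nat => a + (k : Int)) = fun k : Nat => (C - a) - (k : Int) := by
    funext k; simp; ring
  rw [h, zero_add, pv_sum_lin]

-- the main fold keeps its first component when 'count' is identically 0
lemma pv_foldl_fst_zero (l : List Int) (c : Int → Bool) :
    ∀ st : Int × Int,
      (l.foldl (fun (st : Int × Int) i => if c i then (st.1 + 0, i + 1) else st) st).1 = st.1 := by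
  induction l with
  | nil => intro st; rfl
  | cons x t ih =>
      intro st
      simp only [List.foldl_cons]
      by_cases h : c x = true
      · rw [if_pos h, ih]; simp
      · rw [if_neg h, ih]

-- A's boundary loop and B's enumerate-zip loop compute the same state
lemma pv_fold_eq (cs : List Char) (m S : Int) (init : Int × Int) :
    (PySem.List.pyRange 0 ((cs.length : Int) - 1) 1).foldl
      (fun (st : Int × Int) i =>
        if PySem.List.pyGetD cs i ' ' == PySem.List.pyGetD cs (i + 1) ' ' then
          (st.1 + (m * (i + 2 - st.2) - S), i + 1)
        else st) init
    = (PySem.List.pyRange 0 ((cs.length : Int) - 1) 1).foldl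
      (fun (st : Int × Int) j =>
        if (PySem.List.pyGetD (cs.zip cs.tail) j (' ', ' ')).1
            == (PySem.List.pyGetD (cs.zip cs.tail) j (' ', ' ')).2 then
          (st.1 + m * (j + 2 - st.2) - S, j + 1)
        else st) init := by
  apply PySem.List.foldl_congr_mem
  intro acc j hj
  rw [PySem.List.mem_pyRange_one] at hj
  obtain ⟨h0, h1⟩ := hj
  have hzl : ((cs.zip cs.tail).length : Int) = (cs.length : Int) - 1 := by
    simp [List.length_zip]; omega
  rw [PySem.List.pyGetD_eq_getElem (cs.zip cs.tail) (' ', ' ') h0 (by omega)]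
  rw [PySem.List.pyGetD_eq_getElem cs ' ' h0 (by omega)]
  rw [PySem.List.pyGetD_eq_getElem cs ' ' (show (0:Int) ≤ j + 1 by omega) (by omega)]
  simp only [List.getElem_zip, List.getElem_tail]
  have hj1 : (j + 1).toNat = j.toNat + 1 := by omega
  simp only [hj1]
  split_ifs
  · exact Prod.ext_iff.mpr ⟨by ring, rfl⟩
  · rfl

-- main equivalence
theorem pv_main (s : String) (minLen maxLen : Int) :
    countValidSubstrings s minLen maxLen = countValidSubstrings_alt s minLen maxLen := by
  unfold countValidSubstrings countValidSubstrings_alt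
  set cs := s.toList with hcs
  by_cases hmle : min (maxLen + 1) ((cs.length : Int)) - minLen ≤ 0
  · rw [if_pos hmle]
    have hrange : PySem.List.pyRange minLen (min (maxLen + 1) ((cs.length : Int))) 1 = [] :=
      PySem.List.pyRange_one_eq_nil (by omega)
    simp only [hrange, List.foldl_nil]
    rw [pv_foldl_fst_zero _ (fun i => PySem.List.pyGetD cs i ' ' == PySem.List.pyGetD cs (i + 1) ' ')]
    simp
  · rw [if_neg hmle]
    set hi : Int := min (maxLen + 1) ((cs.length : Int)) with hhi
    set m : Int := hi - minLen with hm
    set S : Int := PySem.Int.floordiv (m * (minLen + hi - 1)) 2 with hS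
    have h2S : 2 * S = m * (minLen + hi - 1) := by
      obtain ⟨t, ht⟩ := Int.even_mul_succ_self (m - 1)
      have hE : m * (minLen + hi - 1) = 2 * (m * minLen + t) := by nlinarith [ht]
      rw [hS, hE, PySem.Int.floordiv_eq_ediv_of_pos (by norm_num),
        Int.mul_ediv_cancel_left _ (by norm_num)]
    have hcount : ∀ last cur : Int,
        (PySem.List.pyRange minLen hi 1).foldl
          (fun result i => result + (cur + 1 - last - i + 1)) 0
          = m * (cur + 2 - last) - S := by
      intro last cur
      have hb : ((hi - minLen).toNat : Int) = m := by omega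
      have h2 := pv_two_mul_count minLen hi (cur + 2 - last)
      rw [hb] at h2
      have hfe : (fun (r i : Int) => r + (cur + 1 - last - i + 1))
          = fun (r i : Int) => r + ((cur + 2 - last) - i) := by
        funext r i; ring
      rw [hfe]
      nlinarith [h2, h2S]
    rw [PySem.List.slice_from_one]
    rw [PySem.List.enumerate_eq_map_pyRange (cs.zip cs.tail) (' ', ' ')]
    have hlen : PySem.List.pyRange 0 (PySem.List.len (cs.zip cs.tail)) 1
        = PySem.List.pyRange 0 ((cs.length : Int) - 1) 1 := by
      cases cs with
      | nil => simp [PySem.List.pyRange_one_eq_nil]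
      | cons x t => simp [List.length_zip]
    rw [hlen]
    simp only []
    rw [← hhi]
    simp only [hcount]
    rw [List.foldl_map]
    simp only []
    rw [pv_fold_eq cs m S]
    ring

-- ===== VERDICT (by name: the statement is the Claim_ definition above) =====
theorem countValidSubstrings_spec : Claim_equal_countValidSubstrings := by
  intro s minLen maxLen _
  unfold Spec_countValidSubstrings
  exact pv_main s minLen maxLen
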